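-- pv_equiv track=rewrite | github.com/carloswinck/lotofacil | sistema_final.py | contar_padroes
-- ===== SOURCE A (Python) =====
-- from collections import Counter
--
-- def contar_padroes(matrizes, concursos):
--     padroes_por_linha = [Counter() for _ in range(5)]
--     concursos_padroes = [{} for _ in range(5)]
--     for matriz, concurso in zip(matrizes, concursos):
--         for i, linha in enumerate(matriz):
--             padrao = " ".join(linha)
--             padroes_por_linha[i][padrao] += 1
--             if padrao not in concursos_padroes[i]:
--                 concursos_padroes[i][padrao] = [concurso]
--             else:
--                 concursos_padroes[i][padrao].append(concurso)
--     return padroes_por_linha, concursos_padroes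
-- ===== SOURCE B (Python) =====
-- from collections import Counter
--
-- def contar_padroes(matrizes, concursos):
--     # Transposed traversal: one full scan of the draws PER ROW POSITION (column-major),
--     # instead of A's draw-major loop touching all five rows per draw.
--     pares = list(zip(matrizes, concursos))
--     padroes_por_linha = []
--     concursos_padroes = []
--     for i in range(5):
--         d = {}
--         for matriz, concurso in pares:
--             if i < len(matriz):
--                 d.setdefault(" ".join(matriz[i]), []).append(concurso)
--         concursos_padroes.append(d)
--         # a pattern's count is the length of its occurrence list
--         padroes_por_linha.append(Counter({p: len(l) for p, l in d.items()}))
--     return padroes_por_linha, concursos_padroes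
-- ===== Notes on version B (the rewrite author's own statement) =====
-- stated objective: alternative
-- what changed: B transposes the traversal: instead of A's draw-major loop that updates five counters and five dicts per draw, B loops over the five row positions and for each one scans all draws, building that row's occurrence dict alone and reconstructing its counter afterwards from the occurrence-list lengths (count == len(occurrences)).
import Mathlib
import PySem

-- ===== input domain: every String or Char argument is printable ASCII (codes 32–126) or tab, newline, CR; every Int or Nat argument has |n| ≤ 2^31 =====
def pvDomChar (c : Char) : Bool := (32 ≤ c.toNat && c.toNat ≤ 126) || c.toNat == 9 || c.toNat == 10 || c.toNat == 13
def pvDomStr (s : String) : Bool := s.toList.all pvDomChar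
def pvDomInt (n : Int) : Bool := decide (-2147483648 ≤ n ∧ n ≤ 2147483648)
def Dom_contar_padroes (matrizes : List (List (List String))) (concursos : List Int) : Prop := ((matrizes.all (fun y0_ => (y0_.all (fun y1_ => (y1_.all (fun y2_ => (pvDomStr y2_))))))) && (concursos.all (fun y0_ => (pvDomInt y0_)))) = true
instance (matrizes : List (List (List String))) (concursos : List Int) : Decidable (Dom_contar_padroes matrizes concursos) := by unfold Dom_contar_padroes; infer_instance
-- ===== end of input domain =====

-- B transposes the traversal (one scan of the draws per row position, column-major,
-- counters reconstructed from occurrence-list lengths) instead of A's draw-major loop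
-- (objective: alternative, same cost).


-- ===== PORT A =====
-- one inner-loop body of A: update counter i and occurrence dict i (branching on membership, as A does)
def stepA (concurso : Int)
    (st : List (PySem.Dict String Int) × List (PySem.Dict String (List Int)))
    (il : Int × List String) :
    List (PySem.Dict String Int) × List (PySem.Dict String (List Int)) :=
  let padrao := PySem.Str.join " " il.2
  let c := PySem.List.pyGetD st.1 il.1 PySem.Dict.empty
  let o := PySem.List.pyGetD st.2 il.1 PySem.Dict.empty
  let o' := if o.contains padrao = false
            then o.insert padrao [concurso]
            else o.insert padrao (o.getD padrao [] ++ [concurso])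
  (PySem.List.pySetD st.1 il.1 (c.insert padrao (c.getD padrao 0 + 1)),
   PySem.List.pySetD st.2 il.1 o')

def contar_padroes (matrizes : List (List (List String))) (concursos : List Int) :
    (List (List (String × Int))) × (List (List (String × List Int))) :=
  let init : List (PySem.Dict String Int) × List (PySem.Dict String (List Int)) :=
    (List.replicate 5 PySem.Dict.empty, List.replicate 5 PySem.Dict.empty)
  let fin := (matrizes.zip concursos).foldl
    (fun st mc => (PySem.List.enumerate mc.1 0).foldl (stepA mc.2) st) init
  (fin.1.map PySem.Dict.items, fin.2.map PySem.Dict.items)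

-- ===== PORT B =====
-- B: for each row index i in range(5), one scan of the zipped draws builds that row's
-- occurrence dict (setdefault(..,[]).append = modify); its counter is the list lengths.
def contar_padroes_alt (matrizes : List (List (List String))) (concursos : List Int) :
    (List (List (String × Int))) × (List (List (String × List Int))) :=
  let pares := matrizes.zip concursos
  let occ := (PySem.List.pyRange 0 5 1).map (fun i =>
    pares.foldl (fun d mc =>
      if i < (mc.1.length : Int)
      then d.modify (PySem.Str.join " " (PySem.List.pyGetD mc.1 i [])) [] (· ++ [mc.2])
      else d) PySem.Dict.empty)
  (occ.map (fun d => d.items.map (fun q => (q.1, (q.2.length : Int)))),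
   occ.map PySem.Dict.items)

-- ===== PRECONDITION & SPEC =====
-- Pre_ excludes exactly the inputs where Python A raises IndexError: a zipped matrix with more
-- than 5 rows makes `padroes_por_linha[i]` go out of range (B ignores such rows and returns).
def Pre_contar_padroes (matrizes : List (List (List String))) (concursos : List Int) : Prop :=
  ∀ p ∈ matrizes.zip concursos, p.1.length ≤ 5
instance (matrizes : List (List (List String))) (concursos : List Int) : Decidable (Pre_contar_padroes matrizes concursos) := by unfold Pre_contar_padroes; infer_instance
def pvWitness_contar_padroes : List (List (List String)) × List Int :=
  ([[["01", "02"], ["03"]], [[ "01", "02"], ["04"]]], [100, 101])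

def Spec_contar_padroes (matrizes : List (List (List String))) (concursos : List Int) (out : (List (List (String × Int))) × (List (List (String × List Int)))) : Prop := out = contar_padroes_alt matrizes concursos
instance (matrizes : List (List (List String))) (concursos : List Int) (out : (List (List (String × Int))) × (List (List (String × List Int)))) : Decidable (Spec_contar_padroes matrizes concursos out) := by unfold Spec_contar_padroes; infer_instance

-- ===== CLAIM (what is proved, stated in full; the proofs are below) =====
def Claim_equal_contar_padroes : Prop := ∀ (matrizes : List (List (List String))) (concursos : List Int), Dom_contar_padroes matrizes concursos → Pre_contar_padroes matrizes concursos → Spec_contar_padroes matrizes concursos (contar_padroes matrizes concursos)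

-- ===== LEMMAS AND PROOFS =====

-- proof-side intermediate: A's inner-loop effect on the occurrence dicts alone
def stepB (concurso : Int) (occ : List (PySem.Dict String (List Int))) (il : Int × List String) :
    List (PySem.Dict String (List Int)) :=
  PySem.List.pySetD occ il.1
    ((PySem.List.pyGetD occ il.1 PySem.Dict.empty).modify (PySem.Str.join " " il.2) [] (· ++ [concurso]))

-- the counter a final occurrence dict determines: each list replaced by its length
def cnt (d : PySem.Dict String (List Int)) : PySem.Dict String Int :=
  PySem.Dict.mk (d.items.map (fun q => (q.1, (q.2.length : Int))))

theorem dict_eq_of_items {κ ν : Type} (d e : PySem.Dict κ ν) (h : d.items = e.items) : d = e := by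
  cases d; cases e; simpa using h

theorem cnt_contains (d : PySem.Dict String (List Int)) (p : String) :
    (cnt d).contains p = d.contains p := by
  simp only [cnt, PySem.Dict.contains, List.any_map]
  rfl

theorem cnt_get? (d : PySem.Dict String (List Int)) (p : String) :
    (cnt d).get? p = (d.get? p).map (fun l => (l.length : Int)) := by
  simp only [cnt, PySem.Dict.get?, List.find?_map, Option.map_map]
  rfl

theorem cnt_modify (d : PySem.Dict String (List Int)) (p : String) (z : Int) :
    cnt (d.modify p [] (· ++ [z])) = (cnt d).insert p ((cnt d).getD p 0 + 1) := by
  by_cases h : d.contains p = true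
  · have hc : (cnt d).contains p = true := by rw [cnt_contains]; exact h
    obtain ⟨l, hg⟩ : ∃ l, d.get? p = some l := by
      cases hgg : d.get? p with
      | none => rw [PySem.Dict.contains_eq_isSome_get?, hgg] at h; simp at h
      | some l => exact ⟨l, rfl⟩
    have hgd : d.getD p [] = l := by rw [PySem.Dict.getD_eq_get?_getD, hg]; rfl
    have hcd : (cnt d).getD p 0 = (l.length : Int) := by
      rw [PySem.Dict.getD_eq_get?_getD, cnt_get?, hg]; rfl
    rw [PySem.Dict.modify, hgd, hcd]
    apply dict_eq_of_items
    have hl : (cnt (d.insert p (l ++ [z]))).items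
        = (d.insert p (l ++ [z])).items.map (fun q => (q.1, (q.2.length : Int))) := rfl
    rw [hl, PySem.Dict.items_insert_of_contains d (l ++ [z]) h,
      PySem.Dict.items_insert_of_contains (cnt d) ((l.length : Int) + 1) hc]
    have hi : (cnt d).items = d.items.map (fun q => (q.1, (q.2.length : Int))) := rfl
    rw [hi, List.map_map, List.map_map]
    refine List.map_congr_left (fun q _ => ?_)
    by_cases hq : q.1 = p
    · simp [hq]
    · simp [hq]
  · have h' : d.contains p = false := eq_false_of_ne_true h
    have hc' : (cnt d).contains p = false := by rw [cnt_contains]; exact h'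
    rw [PySem.Dict.modify, PySem.Dict.getD_of_not_contains d [] h',
      PySem.Dict.getD_of_not_contains (cnt d) 0 hc']
    apply dict_eq_of_items
    have hl : (cnt (d.insert p ([] ++ [z]))).items
        = (d.insert p ([] ++ [z])).items.map (fun q => (q.1, (q.2.length : Int))) := rfl
    rw [hl, PySem.Dict.items_insert_of_not_contains d ([] ++ [z]) h',
      PySem.Dict.items_insert_of_not_contains (cnt d) (0 + 1) hc']
    simp [cnt]

-- A's branchy occurrence-dict update is a modify
theorem occ_update_eq (o : PySem.Dict String (List Int)) (p : String) (z : Int) :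
    (if o.contains p = false then o.insert p [z] else o.insert p (o.getD p [] ++ [z]))
      = o.modify p [] (· ++ [z]) := by
  by_cases h : o.contains p = true
  · simp [h, PySem.Dict.modify]
  · have h' : o.contains p = false := eq_false_of_ne_true h
    rw [PySem.Dict.modify, PySem.Dict.getD_of_not_contains o [] h']
    simp [h']

-- one step of A preserves the counters-are-lengths relation
theorem stepA_eq (z : Int) (o5 : List (PySem.Dict String (List Int))) (il : Int × List String)
    (h : 0 ≤ il.1) :
    stepA z (o5.map cnt, o5) il = ((stepB z o5 il).map cnt, stepB z o5 il) := by
  simp only [stepA, stepB]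
  have hmap : PySem.List.pyGetD (o5.map cnt) il.1 PySem.Dict.empty
      = cnt (PySem.List.pyGetD o5 il.1 PySem.Dict.empty) :=
    PySem.List.pyGetD_map cnt o5 il.1 PySem.Dict.empty
  rw [hmap, occ_update_eq, ← cnt_modify,
    PySem.List.pySetD_of_nonneg (o5.map cnt) _ h,
    PySem.List.pySetD_of_nonneg o5 _ h, List.map_set]

theorem inner_eq (c : Int) (linha : List (List String)) :
    ∀ (s : Int) (o5 : List (PySem.Dict String (List Int))), 0 ≤ s →
    (PySem.List.enumerate linha s).foldl (stepA c) (o5.map cnt, o5)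
      = (((PySem.List.enumerate linha s).foldl (stepB c) o5).map cnt,
         (PySem.List.enumerate linha s).foldl (stepB c) o5) := by
  induction linha with
  | nil => intro s o5 _; simp [PySem.List.enumerate_nil]
  | cons x xs ih =>
    intro s o5 hs
    rw [PySem.List.enumerate_cons]
    simp only [List.foldl_cons]
    rw [stepA_eq c o5 (s, x) hs]
    exact ih (s + 1) _ (by omega)

theorem outer_eq (pairs : List ((List (List String)) × Int)) :
    ∀ (o5 : List (PySem.Dict String (List Int))),
    pairs.foldl (fun st mc => (PySem.List.enumerate mc.1 0).foldl (stepA mc.2) st) (o5.map cnt, o5)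
      = ((pairs.foldl (fun occ mc => (PySem.List.enumerate mc.1 0).foldl (stepB mc.2) occ) o5).map cnt,
         pairs.foldl (fun occ mc => (PySem.List.enumerate mc.1 0).foldl (stepB mc.2) occ) o5) := by
  induction pairs with
  | nil => intro o5; rfl
  | cons mc rest ih =>
    intro o5
    simp only [List.foldl_cons]
    rw [inner_eq mc.2 mc.1 0 o5 le_rfl]
    exact ih _

-- stepB folds preserve the length of the dict list
theorem length_foldl_stepB (c : Int) (l : List (Int × List String)) :
    ∀ (o5 : List (PySem.Dict String (List Int))), (l.foldl (stepB c) o5).length = o5.length := by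
  induction l with
  | nil => intro o5; rfl
  | cons x xs ih =>
    intro o5
    rw [List.foldl_cons, ih]
    simp [stepB]

theorem length_outer (pairs : List ((List (List String)) × Int)) :
    ∀ (o5 : List (PySem.Dict String (List Int))),
    (pairs.foldl (fun occ mc => (PySem.List.enumerate mc.1 0).foldl (stepB mc.2) occ) o5).length
      = o5.length := by
  induction pairs with
  | nil => intro o5; rfl
  | cons mc rest ih =>
    intro o5
    rw [List.foldl_cons, ih, length_foldl_stepB]

-- effect of one draw's inner loop on the k-th occurrence dict
theorem inner_getD (c : Int) (rows : List (List String)) :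
    ∀ (s : Nat) (o5 : List (PySem.Dict String (List Int))) (k : Nat),
    s + rows.length ≤ o5.length →
    ((PySem.List.enumerate rows (s : Int)).foldl (stepB c) o5).getD k PySem.Dict.empty
      = if s ≤ k ∧ k < s + rows.length
        then (o5.getD k PySem.Dict.empty).modify
               (PySem.Str.join " " (rows.getD (k - s) [])) [] (· ++ [c])
        else o5.getD k PySem.Dict.empty := by
  induction rows with
  | nil =>
    intro s o5 k _
    rw [PySem.List.enumerate_nil, List.foldl_nil, if_neg (fun h => by simp at h; omega)]
  | cons x xs ih =>
    intro s o5 k hb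
    have hb' : s + (xs.length + 1) ≤ o5.length := by simpa using hb
    have hs : s < o5.length := by omega
    rw [PySem.List.enumerate_cons]
    simp only [List.foldl_cons]
    have hstep : stepB c o5 ((s : Int), x)
        = o5.set s ((o5.getD s PySem.Dict.empty).modify (PySem.Str.join " " x) [] (· ++ [c])) := by
      simp only [stepB]
      rw [PySem.List.pySetD_of_nonneg o5 _ (by positivity), PySem.List.pyGetD_natCast]
      simp
    have hcast : ((s : Int) + 1) = (((s + 1 : Nat)) : Int) := by push_cast; ring
    rw [hstep, hcast, ih (s + 1) _ k (by rw [List.length_set]; omega)]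
    have hset : ∀ (j : Nat) (v : PySem.Dict String (List Int)),
        (o5.set s v).getD j PySem.Dict.empty = if j = s then v else o5.getD j PySem.Dict.empty := by
      intro j v
      by_cases hj : j = s
      · subst hj
        rw [if_pos rfl, List.getD_eq_getElem?_getD, List.getElem?_set, if_pos rfl]
        simp [hs]
      · rw [if_neg hj, List.getD_eq_getElem?_getD, List.getElem?_set,
          if_neg (fun h => hj h.symm), ← List.getD_eq_getElem?_getD]
    by_cases h1 : s + 1 ≤ k ∧ k < s + 1 + xs.length
    · rw [if_pos h1, if_pos (by simp; omega)]
      rw [hset, if_neg (by omega)]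
      have hks : k - s = (k - (s + 1)) + 1 := by omega
      rw [hks]
      rfl
    · rw [if_neg h1, hset]
      by_cases h2 : k = s
      · rw [if_pos h2, if_pos (by simp; omega), h2]
        simp
      · rw [if_neg h2, if_neg (by simp; omega)]

-- transposition: the k-th occurrence dict of A's draw-major fold is B's per-row fold
theorem outer_getD (pairs : List ((List (List String)) × Int)) :
    ∀ (o5 : List (PySem.Dict String (List Int))) (k : Nat), k < o5.length →
    (∀ mc ∈ pairs, mc.1.length ≤ o5.length) →
    (pairs.foldl (fun occ mc => (PySem.List.enumerate mc.1 0).foldl (stepB mc.2) occ) o5).getD k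
        PySem.Dict.empty
      = pairs.foldl (fun d mc =>
          if (k : Int) < (mc.1.length : Int)
          then d.modify (PySem.Str.join " " (PySem.List.pyGetD mc.1 (k : Int) [])) [] (· ++ [mc.2])
          else d) (o5.getD k PySem.Dict.empty) := by
  induction pairs with
  | nil => intro o5 k _ _; rfl
  | cons mc rest ih =>
    intro o5 k hk hpre
    simp only [List.foldl_cons]
    have h0 : ((0 : Nat) : Int) = (0 : Int) := rfl
    have hb : 0 + mc.1.length ≤ o5.length := by
      simpa using hpre mc (List.mem_cons_self)
    rw [ih _ k (by rw [length_foldl_stepB]; exact hk)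
        (fun p hp => by rw [length_foldl_stepB]; exact hpre p (List.mem_cons_of_mem _ hp))]
    congr 1
    rw [← h0, inner_getD mc.2 mc.1 0 o5 k hb]
    by_cases hcase : k < mc.1.length
    · rw [if_pos (by omega), if_pos (by exact_mod_cast hcase)]
      rw [PySem.List.pyGetD_natCast]
      simp
    · rw [if_neg (by omega), if_neg (by exact_mod_cast hcase)]

-- the occurrence-dict lists of the two algorithms coincide (under Pre_)
theorem occ_lists_eq (matrizes : List (List (List String))) (concursos : List Int)
    (hpre : ∀ p ∈ matrizes.zip concursos, p.1.length ≤ 5) :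
    (matrizes.zip concursos).foldl
        (fun occ mc => (PySem.List.enumerate mc.1 0).foldl (stepB mc.2) occ)
        (List.replicate 5 PySem.Dict.empty)
      = (PySem.List.pyRange 0 5 1).map (fun i =>
          (matrizes.zip concursos).foldl (fun d mc =>
            if i < (mc.1.length : Int)
            then d.modify (PySem.Str.join " " (PySem.List.pyGetD mc.1 i [])) [] (· ++ [mc.2])
            else d) PySem.Dict.empty) := by
  apply List.ext_getElem
  · rw [length_outer]
    simp [PySem.List.length_pyRange_one]
  · intro k h1 h2
    have hk5 : k < 5 := by
      simpa [PySem.List.length_pyRange_one] using h2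
    rw [← List.getD_eq_getElem _ PySem.Dict.empty h1]
    rw [outer_getD _ _ k (by simpa using hk5) (fun p hp => by simpa using hpre p hp)]
    simp only [List.getElem_map, PySem.List.getElem_pyRange_one, zero_add]
    congr 1
    interval_cases k <;> rfl

-- ===== VERDICT (by name: the statement is the Claim_ definition above) =====
theorem contar_padroes_spec : Claim_equal_contar_padroes := by
  intro matrizes concursos _ hpre
  show contar_padroes matrizes concursos = contar_padroes_alt matrizes concursos
  simp only [contar_padroes, contar_padroes_alt]
  have h0 : (List.replicate 5 (PySem.Dict.empty : PySem.Dict String Int))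
      = (List.replicate 5 (PySem.Dict.empty : PySem.Dict String (List Int))).map cnt := rfl
  rw [h0, outer_eq (matrizes.zip concursos) (List.replicate 5 PySem.Dict.empty)]
  rw [occ_lists_eq matrizes concursos hpre]
  simp only [List.map_map]
  rfl
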